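-- pv_equiv track=rewrite | github.com/tiammomo/moyuan-skills | scripts/market_utils.py | rewrite_command_paths
-- ===== SOURCE A (Python) =====
-- import shlex
--
-- def rewrite_command_paths(command: str, replacements: list[tuple[str, str]]) -> str:
--     if not command:
--         return command
--     try:
--         tokens = shlex.split(command)
--     except ValueError:
--         return command
--
--     normalized = sorted(
--         [(old.rstrip("/"), new.rstrip("/")) for old, new in replacements if old and new],
--         key=lambda item: len(item[0]),
--         reverse=True,
--     )
--     rewritten: list[str] = []
--     for token in tokens:
--         updated = token
--         for old_prefix, new_prefix in normalized:
--             if token == old_prefix: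
--                 updated = new_prefix
--                 break
--             if token.startswith(f"{old_prefix}/"):
--                 updated = f"{new_prefix}{token[len(old_prefix):]}"
--                 break
--         rewritten.append(updated)
--     return shlex.join(rewritten)
-- ===== SOURCE B (Python) =====
-- # Dependency-free rewrite: an explicit four-mode POSIX tokenizer/quoter replaces the
-- # shlex import, and longest-prefix matching uses a dict over the token's '/'-cuts
-- # instead of sorting the replacement list.
--
-- _SAFE = frozenset("abcdefghijklmnopqrstuvwxyzABCDEFGHIJKLMNOPQRSTUVWXYZ0123456789_@%+=:,./-")
--
--
-- def _split(s):
--     """POSIX-shlex-compatible tokenizer (mode 0 = between tokens, 1 = in a token,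
--     2 = in '...', 3 = in "..."); returns None where the syntax is invalid
--     (unclosed quote / trailing escape)."""
--     mode, cur, tokens = 0, "", []
--     i, n = 0, len(s)
--     while i < n:
--         c = s[i]
--         i += 1
--         if mode == 2:
--             if c == "'":
--                 mode = 1
--             else:
--                 cur += c
--         elif mode == 3:
--             if c == '"':
--                 mode = 1
--             elif c == "\\":
--                 if i == n:
--                     return None
--                 nx = s[i]
--                 i += 1
--                 cur += nx if nx in '"\\' else "\\" + nx
--             else:
--                 cur += c
--         elif c in " \t\r\n":
--             if mode == 1:
--                 tokens.append(cur)
--                 cur = ""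
--             mode = 0
--         elif c == "'":
--             mode = 2
--         elif c == '"':
--             mode = 3
--         elif c == "\\":
--             if i == n:
--                 return None
--             cur += s[i]
--             i += 1
--             mode = 1
--         else:
--             cur += c
--             mode = 1
--     if mode == 0:
--         return tokens
--     if mode == 1:
--         return tokens + [cur]
--     return None
--
--
-- def _quote(t):
--     """Shell-quote one token (shlex.quote-compatible)."""
--     if not t:
--         return "''"
--     if any(c not in _SAFE for c in t):
--         return "'" + "".join("'\"'\"'" if c == "'" else c for c in t) + "'"
--     return t
--
--
-- def rewrite_command_paths(command: str, replacements: list[tuple[str, str]]) -> str: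
--     if not command:
--         return command
--     tokens = _split(command)
--     if tokens is None:
--         return command
--
--     # Longest-prefix matching via a hash table keyed by the normalized old path:
--     # no sorting of the replacement list; setdefault keeps the first entry per key.
--     table = {}
--     for old, new in replacements:
--         if old and new:
--             table.setdefault(old.rstrip("/"), new.rstrip("/"))
--
--     def rewrite(token):
--         # Candidate prefixes of the token itself, longest first: the whole token,
--         # then every prefix ending just before a '/'.
--         for i in [len(token)] + [j for j in range(len(token) - 1, -1, -1) if token[j] == "/"]:
--             new = table.get(token[:i])
--             if new is not None:
--                 return new + token[i:]
--         return token
--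
--     return " ".join(_quote(rewrite(t)) for t in tokens)
-- ===== Notes on version B (the rewrite author's own statement) =====
-- stated objective: alternative
-- what changed: B is dependency-free: it replaces the shlex import with an explicit four-mode tokenizer and quoter, and it drops A's stable length-descending sort of the replacement list and per-token first-match scan in favour of a dict keyed by the normalized old prefix (setdefault keeps the first entry) queried at the token's own '/'-cut prefixes from longest to shortest.
import Mathlib
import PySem

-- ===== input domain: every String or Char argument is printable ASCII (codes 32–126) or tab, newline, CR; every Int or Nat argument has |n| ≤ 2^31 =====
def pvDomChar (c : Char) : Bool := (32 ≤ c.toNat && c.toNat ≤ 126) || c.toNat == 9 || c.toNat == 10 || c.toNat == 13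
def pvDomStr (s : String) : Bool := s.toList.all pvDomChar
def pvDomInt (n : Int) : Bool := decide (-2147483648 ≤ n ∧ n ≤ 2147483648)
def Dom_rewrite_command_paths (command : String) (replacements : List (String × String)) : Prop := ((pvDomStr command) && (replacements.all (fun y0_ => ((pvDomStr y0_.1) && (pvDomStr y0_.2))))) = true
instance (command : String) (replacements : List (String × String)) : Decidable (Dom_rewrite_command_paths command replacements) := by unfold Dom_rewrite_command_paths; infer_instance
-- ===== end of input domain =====

-- B is dependency-free: an explicit four-mode tokenizer/quoter replaces A's shlex calls, and
-- A's stable length-descending sort + first-match scan of the replacement list becomes a hash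
-- table keyed by the normalized old path, queried at each '/'-cut of the token from longest to
-- shortest; objective: alternative.


-- ===== PORT A =====
-- hand port of shlex.split (posix rules, as exercised by shlex.split) and shlex.join;
-- exact on the ASCII domain above

def pvWs (c : Char) : Bool := c = ' ' || c = '\t' || c = '\r' || c = '\n'

def pvSpecial (c : Char) : Bool := pvWs c || c = '\'' || c = '"' || c = '\\'

-- single-quoted section: everything up to the next ' ; none = unclosed quote (ValueError)
def pvSQuote : List Char → Option (List Char × List Char)
  | [] => none
  | c :: cs =>
    if c = '\'' then some ([], cs)
    else match pvSQuote cs with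
      | none => none
      | some (b, r) => some (c :: b, r)

-- double-quoted section: backslash escapes only " and \ ; none = unclosed quote / trailing escape
def pvDQuote : List Char → Option (List Char × List Char)
  | [] => none
  | c :: cs =>
    if c = '"' then some ([], cs)
    else if c = '\\' then
      match cs with
      | [] => none
      | nx :: cs' =>
        match pvDQuote cs' with
        | none => none
        | some (b, r) => some ((if nx = '"' || nx = '\\' then [nx] else ['\\', nx]) ++ b, r)
    else match pvDQuote cs with
      | none => none
      | some (b, r) => some (c :: b, r)

theorem pvSQuote_len (cs : List Char) (b r : List Char)
    (h : pvSQuote cs = some (b, r)) : r.length < cs.length := by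
  induction cs generalizing b r with
  | nil => simp [pvSQuote] at h
  | cons c t ih =>
    by_cases hc : c = '\''
    · simp [pvSQuote, hc] at h
      obtain ⟨h1, h2⟩ := h
      subst h2
      simp
    · simp only [pvSQuote, if_neg hc] at h
      cases ht : pvSQuote t with
      | none => simp [ht] at h
      | some p =>
        obtain ⟨b', r'⟩ := p
        simp [ht] at h
        have := ih b' r' ht
        obtain ⟨h1, h2⟩ := h
        subst h2
        simp
        omega

theorem pvDQuote_len_aux (n : Nat) : ∀ (cs : List Char), cs.length ≤ n →
    ∀ b r, pvDQuote cs = some (b, r) → r.length < cs.length := by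
  induction n with
  | zero =>
    intro cs hlen b r h
    have : cs = [] := List.length_eq_zero_iff.mp (Nat.le_zero.mp hlen)
    subst this
    simp [pvDQuote] at h
  | succ n ih =>
    intro cs hlen b r h
    match cs with
    | [] => simp [pvDQuote] at h
    | c :: t =>
      rw [pvDQuote.eq_def] at h
      by_cases hc : c = '"'
      · simp [hc] at h
        obtain ⟨h1, h2⟩ := h
        subst h2
        simp
      · by_cases hb : c = '\\'
        · match t with
          | [] => simp [hc, hb] at h
          | nx :: cs' =>
            simp only [if_neg hc, if_pos hb] at h
            cases ht : pvDQuote cs' with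
            | none => simp [ht] at h
            | some p =>
              obtain ⟨b', r'⟩ := p
              simp [ht] at h
              have hlt := ih cs' (by simp at hlen ⊢; omega) b' r' ht
              obtain ⟨h1, h2⟩ := h
              subst h2
              simp
              omega
        · simp only [if_neg hc, if_neg hb] at h
          cases ht : pvDQuote t with
          | none => simp [ht] at h
          | some p =>
            obtain ⟨b', r'⟩ := p
            simp [ht] at h
            have hlt := ih t (by simp at hlen ⊢; omega) b' r' ht
            obtain ⟨h1, h2⟩ := h
            subst h2
            simp
            omega

theorem pvDQuote_len (cs : List Char) (b r : List Char)
    (h : pvDQuote cs = some (b, r)) : r.length < cs.length :=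
  pvDQuote_len_aux cs.length cs (le_refl _) b r h

-- the scanner: cur = the token being accumulated (none = no token open); result = shlex.split, none = ValueError
def pvSplitAux (cur : Option (List Char)) (s : List Char) : Option (List (List Char)) :=
  match s with
  | [] => some (match cur with | none => [] | some t => [t])
  | c :: cs =>
    if pvWs c then
      match cur with
      | none => pvSplitAux none cs
      | some t => (pvSplitAux none cs).map (t :: ·)
    else if c = '\'' then
      match h : pvSQuote cs with
      | none => none
      | some (b, r) => pvSplitAux (some (cur.getD [] ++ b)) r
    else if c = '"' then
      match h : pvDQuote cs with
      | none => none
      | some (b, r) => pvSplitAux (some (cur.getD [] ++ b)) r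
    else if c = '\\' then
      match cs with
      | [] => none
      | nx :: cs' => pvSplitAux (some (cur.getD [] ++ [nx])) cs'
    else
      pvSplitAux (some (cur.getD [] ++ (c :: cs.takeWhile (fun d => !pvSpecial d))))
        (cs.dropWhile (fun d => !pvSpecial d))
termination_by s.length
decreasing_by
  all_goals
    first
      | (have := pvSQuote_len cs b r h; simp; try omega)
      | (have := pvDQuote_len cs b r h; simp; try omega)
      | (have := (List.dropWhile_sublist (l := cs) (p := fun d => !pvSpecial d)).length_le
         simp; try omega)
      | (simp; try omega)

def pvSplit (s : List Char) : Option (List (List Char)) := pvSplitAux none s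

-- shlex.quote: safe chars are [A-Za-z0-9_@%+=:,./-]
def pvSafe (c : Char) : Bool :=
  ('a' ≤ c && c ≤ 'z') || ('A' ≤ c && c ≤ 'Z') || ('0' ≤ c && c ≤ '9') ||
  c = '_' || c = '@' || c = '%' || c = '+' || c = '=' || c = ':' || c = ',' ||
  c = '.' || c = '/' || c = '-'

def pvQuote (t : List Char) : List Char :=
  if t.isEmpty then ['\'', '\'']
  else if t.all pvSafe then t
  else '\'' :: (t.flatMap (fun c => if c = '\'' then ['\'', '"', '\'', '"', '\''] else [c])) ++ ['\'']

def pvJoin (ts : List (List Char)) : List Char := List.intercalate [' '] (ts.map pvQuote)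

-- old.rstrip("/")
def pvRstripSlash (s : List Char) : List Char := (s.reverse.dropWhile (fun c => c = '/')).reverse

-- [(old.rstrip('/'), new.rstrip('/')) for old, new in replacements if old and new]
def pvNormalize (reps : List (String × String)) : List (List Char × List Char) :=
  reps.filterMap (fun p =>
    if p.1.toList = [] || p.2.toList = [] then none
    else some (pvRstripSlash p.1.toList, pvRstripSlash p.2.toList))

-- A's inner loop: first match in the length-descending sorted list wins (break)
def pvApplyFirst (token : List Char) : List (List Char × List Char) → List Char
  | [] => token
  | (o, n) :: rest =>
    if token = o then n
    else if PySem.Chars.startswith token (o ++ ['/']) then n ++ token.drop o.length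
    else pvApplyFirst token rest

def rewrite_command_paths (command : String) (replacements : List (String × String)) : String :=
  if command.toList = [] then command
  else
    match pvSplit command.toList with
    | none => command
    | some tokens =>
      let normalized :=
        PySem.List.sorted (pvNormalize replacements) (fun p => p.1.length) true
      String.mk (pvJoin (tokens.foldl (fun acc t => acc ++ [pvApplyFirst t normalized]) []))

-- ===== PORT B =====
-- B's hand port of shlex.split is a four-mode character DFA (0 = between tokens, 1 = inside a
-- token, 2 = inside '…', 3 = inside "…") accumulating the current token and the token list
-- back-to-front; exact on the ASCII domain above

def pvScanB (mode : Nat) (cur : List Char) (acc : List (List Char)) (s : List Char) :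
    Option (List (List Char)) :=
  match s with
  | [] =>
    if mode = 0 then some acc.reverse
    else if mode = 1 then some ((cur.reverse :: acc).reverse)
    else none                                   -- unclosed quote: ValueError
  | c :: cs =>
    if mode = 2 then
      if c = '\'' then pvScanB 1 cur acc cs
      else pvScanB 2 (c :: cur) acc cs
    else if mode = 3 then
      if c = '"' then pvScanB 1 cur acc cs
      else if c = '\\' then
        match cs with
        | [] => none                            -- trailing escape: ValueError
        | nx :: cs' =>
          pvScanB 3 ((if nx = '"' || nx = '\\' then [nx] else [nx, '\\']) ++ cur) acc cs'
      else pvScanB 3 (c :: cur) acc cs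
    else
      if pvWs c then
        if mode = 1 then pvScanB 0 [] (cur.reverse :: acc) cs
        else pvScanB 0 [] acc cs
      else if c = '\'' then pvScanB 2 cur acc cs
      else if c = '"' then pvScanB 3 cur acc cs
      else if c = '\\' then
        match cs with
        | [] => none                            -- trailing escape: ValueError
        | nx :: cs' => pvScanB 1 (nx :: cur) acc cs'
      else pvScanB 1 (c :: cur) acc cs
termination_by s.length
decreasing_by all_goals simp; try omega

def pvSplitB (s : List Char) : Option (List (List Char)) := pvScanB 0 [] [] s

-- shlex.quote, B style: test via any, build via foldr
def pvQuoteB (t : List Char) : List Char :=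
  match t with
  | [] => ['\'', '\'']
  | _ :: _ =>
    if t.any (fun c => !pvSafe c) then
      '\'' :: t.foldr
        (fun c r => if c = '\'' then '\'' :: '"' :: '\'' :: '"' :: '\'' :: r else c :: r) ['\'']
    else t

-- shlex.join, B style: structural recursion with the separator
def pvJoinB : List (List Char) → List Char
  | [] => []
  | [t] => pvQuoteB t
  | t :: ts => pvQuoteB t ++ ' ' :: pvJoinB ts

-- table = {}; for old, new in replacements: if old and new: table.setdefault(old.rstrip('/'), new.rstrip('/'))
def pvTableB (replacements : List (String × String)) : PySem.Dict (List Char) (List Char) :=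
  replacements.foldl
    (fun d p =>
      if p.1.toList = [] || p.2.toList = [] then d
      else PySem.Dict.setdefault d (p.1.toList.rdropWhile (fun c => c = '/'))
        (p.2.toList.rdropWhile (fun c => c = '/')))
    PySem.Dict.empty

-- [len(token)] + [j for j in range(len(token)-1, -1, -1) if token[j] == '/']
-- (range(n-1, -1, -1) is ported as (List.range n).reverse — exact; token[j] with 0 ≤ j < len is getD)
def pvCutsB (t : List Char) : List Nat :=
  t.length :: ((List.range t.length).reverse.filter (fun j => t.getD j ' ' = '/'))

-- the loop 'for i in cuts: new = table.get(token[:i]); if new is not None: return new + token[i:]'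
def pvRewriteTokB (t : List Char) (table : PySem.Dict (List Char) (List Char)) : List Char :=
  match (pvCutsB t).findSome? (fun i => (table.get? (t.take i)).map (fun n => n ++ t.drop i)) with
  | some r => r
  | none => t

def rewrite_command_paths_alt (command : String) (replacements : List (String × String)) : String :=
  if command.toList = [] then command
  else
    match pvSplitB command.toList with
    | none => command
    | some tokens =>
      let table := pvTableB replacements
      String.mk (pvJoinB (tokens.map (fun t => pvRewriteTokB t table)))

-- ===== PRECONDITION & SPEC =====
def Spec_rewrite_command_paths (command : String) (replacements : List (String × String)) (out : String) : Prop := out = rewrite_command_paths_alt command replacements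
instance (command : String) (replacements : List (String × String)) (out : String) : Decidable (Spec_rewrite_command_paths command replacements out) := by unfold Spec_rewrite_command_paths; infer_instance

-- ===== CLAIM (what is proved, stated in full; the proofs are below) =====
def Claim_equal_rewrite_command_paths : Prop := ∀ (command : String) (replacements : List (String × String)), Dom_rewrite_command_paths command replacements → Spec_rewrite_command_paths command replacements (rewrite_command_paths command replacements)

-- ===== LEMMAS AND PROOFS =====

-- ---- 1. the two shlex.split ports agree ----

theorem pvScanB_sq (cs : List Char) : ∀ cur acc,
    pvScanB 2 cur acc cs =
      match pvSQuote cs with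
      | none => none
      | some (b, r) => pvScanB 1 (b.reverse ++ cur) acc r := by
  induction cs with
  | nil => intro cur acc; simp [pvScanB, pvSQuote]
  | cons c cs ih =>
    intro cur acc
    by_cases hc : c = '\''
    · subst hc
      rw [pvScanB.eq_def]
      simp [pvSQuote]
    · have hL : pvScanB 2 cur acc (c :: cs) = pvScanB 2 (c :: cur) acc cs := by
        rw [pvScanB.eq_def]; simp [hc]
      have hS : pvSQuote (c :: cs) =
          match pvSQuote cs with
          | none => none
          | some (b, r) => some (c :: b, r) := by
        rw [pvSQuote.eq_def]; simp [hc]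
      rw [hL, ih, hS]
      cases h : pvSQuote cs with
      | none => simp
      | some p =>
        obtain ⟨b, r⟩ := p
        simp

theorem pvScanB_dq (n : Nat) : ∀ (cs : List Char), cs.length ≤ n → ∀ cur acc,
    pvScanB 3 cur acc cs =
      match pvDQuote cs with
      | none => none
      | some (b, r) => pvScanB 1 (b.reverse ++ cur) acc r := by
  induction n with
  | zero =>
    intro cs hlen cur acc
    have : cs = [] := List.length_eq_zero_iff.mp (Nat.le_zero.mp hlen)
    subst this
    simp [pvScanB, pvDQuote]
  | succ n ih =>
    intro cs hlen cur acc
    match cs with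
    | [] => simp [pvScanB, pvDQuote]
    | c :: cs' =>
      by_cases hc : c = '"'
      · subst hc
        have hL : pvScanB 3 cur acc ('"' :: cs') = pvScanB 1 cur acc cs' := by
          rw [pvScanB.eq_def]; simp
        have hS : pvDQuote ('"' :: cs') = some ([], cs') := by
          rw [pvDQuote.eq_def]; simp
        rw [hL, hS]
        simp
      · by_cases hb : c = '\\'
        · subst hb
          match cs' with
          | [] =>
            have hL : pvScanB 3 cur acc ['\\'] = none := by
              rw [pvScanB.eq_def]; simp
            have hS : pvDQuote ['\\'] = none := by
              rw [pvDQuote.eq_def]; simp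
            rw [hL, hS]
          | nx :: cs'' =>
            have hL : pvScanB 3 cur acc ('\\' :: nx :: cs'') =
                pvScanB 3 ((if nx = '"' || nx = '\\' then [nx] else [nx, '\\']) ++ cur) acc cs'' := by
              rw [pvScanB.eq_def]; simp
            have hS : pvDQuote ('\\' :: nx :: cs'') =
                match pvDQuote cs'' with
                | none => none
                | some (b, r) =>
                  some ((if nx = '"' || nx = '\\' then [nx] else ['\\', nx]) ++ b, r) := by
              rw [pvDQuote.eq_def]; simp
            rw [hL, ih cs'' (by simp at hlen ⊢; omega), hS]
            cases h : pvDQuote cs'' with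
            | none => simp
            | some p =>
              obtain ⟨b, r⟩ := p
              simp only []
              by_cases hnx : nx = '"' ∨ nx = '\\'
              · rcases hnx with hnx | hnx <;> subst hnx <;> simp
              · push_neg at hnx
                simp [hnx.1, hnx.2]
        · have hL : pvScanB 3 cur acc (c :: cs') = pvScanB 3 (c :: cur) acc cs' := by
            rw [pvScanB.eq_def]; simp [hc, hb]
          have hS : pvDQuote (c :: cs') =
              match pvDQuote cs' with
              | none => none
              | some (b, r) => some (c :: b, r) := by
            rw [pvDQuote.eq_def]; simp [hc, hb]
          rw [hL, ih cs' (by simp at hlen ⊢; omega), hS]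
          cases h : pvDQuote cs' with
          | none => simp
          | some p =>
            obtain ⟨b, r⟩ := p
            simp

theorem pvSplitAux_run (t : List Char) (cs : List Char) :
    pvSplitAux (some t) cs =
      pvSplitAux (some (t ++ cs.takeWhile (fun d => !pvSpecial d)))
        (cs.dropWhile (fun d => !pvSpecial d)) := by
  cases cs with
  | nil => simp
  | cons d cs' =>
    by_cases hd : pvSpecial d = true
    · simp [List.takeWhile_cons, List.dropWhile_cons, hd]
    · have hsp : pvSpecial d = false := by
        cases h : pvSpecial d
        · rfl
        · exact absurd h hd
      have hws : pvWs d = false := by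
        cases h : pvWs d
        · rfl
        · exact absurd (by simp [pvSpecial, h]) hd
      have hq1 : ¬ d = '\'' := fun h => hd (by simp [pvSpecial, h])
      have hq2 : ¬ d = '"' := fun h => hd (by simp [pvSpecial, h])
      have hq3 : ¬ d = '\\' := fun h => hd (by simp [pvSpecial, h])
      rw [pvSplitAux.eq_def]
      simp only [hws, Bool.false_eq_true, if_false, if_neg hq1, if_neg hq2, if_neg hq3,
        Option.getD_some]
      rw [List.takeWhile_cons, List.dropWhile_cons]
      simp [hsp]

theorem pvScanB_main (n : Nat) : ∀ (cs : List Char), cs.length ≤ n →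
    ∀ (mode : Nat) cur acc, mode = 0 ∨ mode = 1 → (mode = 0 → cur = []) →
    pvScanB mode cur acc cs =
      (pvSplitAux (if mode = 1 then some cur.reverse else none) cs).map (acc.reverse ++ ·) := by
  induction n with
  | zero =>
    intro cs hlen mode cur acc hm hc0
    have : cs = [] := List.length_eq_zero_iff.mp (Nat.le_zero.mp hlen)
    subst this
    rcases hm with rfl | rfl <;> simp [pvScanB, pvSplitAux]
  | succ n ih =>
    intro cs hlen mode cur acc hm hc0
    have hmode2 : ¬ mode = 2 := by rcases hm with rfl | rfl <;> simp
    have hmode3 : ¬ mode = 3 := by rcases hm with rfl | rfl <;> simp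
    match cs with
    | [] => rcases hm with rfl | rfl <;> simp [pvScanB, pvSplitAux]
    | c :: cs' =>
      have hlen' : cs'.length ≤ n := by simp at hlen ⊢; omega
      by_cases hw : pvWs c = true
      · have hL : pvScanB mode cur acc (c :: cs') =
            (if mode = 1 then pvScanB 0 [] (cur.reverse :: acc) cs'
             else pvScanB 0 [] acc cs') := by
          rw [pvScanB.eq_def]; simp [hmode2, hmode3, hw]
        rcases hm with rfl | rfl
        · rw [hL, ih cs' hlen' 0 [] acc (Or.inl rfl) (fun _ => rfl)]
          have hR : pvSplitAux none (c :: cs') = pvSplitAux none cs' := by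
            rw [pvSplitAux.eq_def]; simp [hw]
          simp [hR]
        · rw [hL, ih cs' hlen' 0 [] (cur.reverse :: acc) (Or.inl rfl) (fun _ => rfl)]
          have hR : pvSplitAux (some cur.reverse) (c :: cs') =
              (pvSplitAux none cs').map (cur.reverse :: ·) := by
            rw [pvSplitAux.eq_def]; simp [hw]
          simp [hR]
          all_goals (cases pvSplitAux none cs' <;> simp)
      · by_cases hq1 : c = '\''
        · subst hq1
          have hL : pvScanB mode cur acc ('\'' :: cs') = pvScanB 2 cur acc cs' := by
            rw [pvScanB.eq_def]; simp [hmode2, hmode3, hw]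
          have hR : pvSplitAux (if mode = 1 then some cur.reverse else none) ('\'' :: cs') =
              match pvSQuote cs' with
              | none => none
              | some (b, r) =>
                pvSplitAux
                  (some ((if mode = 1 then some cur.reverse else none).getD [] ++ b)) r := by
            rw [pvSplitAux.eq_def]; simp [hw]
            all_goals (rcases pvSQuote cs' with _ | ⟨b, r⟩ <;> rfl)
          rw [hL, pvScanB_sq cs', hR]
          cases h : pvSQuote cs' with
          | none => simp
          | some p =>
            obtain ⟨b, r⟩ := p
            have hr := pvSQuote_len cs' b r h
            dsimp only
            rw [ih r (by omega) 1 (b.reverse ++ cur) acc (Or.inr rfl) (by simp)]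
            rcases hm with rfl | rfl
            · simp [hc0 rfl]
            · simp
        · by_cases hq2 : c = '"'
          · subst hq2
            have hL : pvScanB mode cur acc ('"' :: cs') = pvScanB 3 cur acc cs' := by
              rw [pvScanB.eq_def]; simp [hmode2, hmode3, hw]
            have hR : pvSplitAux (if mode = 1 then some cur.reverse else none) ('"' :: cs') =
                match pvDQuote cs' with
                | none => none
                | some (b, r) =>
                  pvSplitAux
                    (some ((if mode = 1 then some cur.reverse else none).getD [] ++ b)) r := by
              rw [pvSplitAux.eq_def]; simp [hw]
              all_goals (rcases pvDQuote cs' with _ | ⟨b, r⟩ <;> rfl)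
            rw [hL, pvScanB_dq cs'.length cs' (le_refl _), hR]
            cases h : pvDQuote cs' with
            | none => simp
            | some p =>
              obtain ⟨b, r⟩ := p
              have hr := pvDQuote_len cs' b r h
              dsimp only
              rw [ih r (by omega) 1 (b.reverse ++ cur) acc (Or.inr rfl) (by simp)]
              rcases hm with rfl | rfl
              · simp [hc0 rfl]
              · simp
          · by_cases hq3 : c = '\\'
            · subst hq3
              match cs' with
              | [] =>
                have hL : pvScanB mode cur acc ['\\'] = none := by
                  rw [pvScanB.eq_def]; simp [hmode2, hmode3, hw]
                have hR : pvSplitAux (if mode = 1 then some cur.reverse else none) ['\\'] =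
                    none := by
                  rw [pvSplitAux.eq_def]; simp [hw]
                rw [hL, hR]
                rfl
              | nx :: cs'' =>
                have hL : pvScanB mode cur acc ('\\' :: nx :: cs'') =
                    pvScanB 1 (nx :: cur) acc cs'' := by
                  rw [pvScanB.eq_def]; simp [hmode2, hmode3, hw]
                have hR : pvSplitAux (if mode = 1 then some cur.reverse else none)
                      ('\\' :: nx :: cs'') =
                    pvSplitAux
                      (some ((if mode = 1 then some cur.reverse else none).getD [] ++ [nx]))
                      cs'' := by
                  rw [pvSplitAux.eq_def]; simp [hw]
                rw [hL, hR, ih cs'' (by simp at hlen ⊢; omega) 1 (nx :: cur) acc (Or.inr rfl)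
                  (by simp)]
                rcases hm with rfl | rfl
                · simp [hc0 rfl]
                · simp
            · have hL : pvScanB mode cur acc (c :: cs') = pvScanB 1 (c :: cur) acc cs' := by
                rw [pvScanB.eq_def]; simp [hmode2, hmode3, hw, hq1, hq2, hq3]
              have hR : pvSplitAux (if mode = 1 then some cur.reverse else none) (c :: cs') =
                  pvSplitAux
                    (some ((if mode = 1 then some cur.reverse else none).getD [] ++
                      (c :: cs'.takeWhile (fun d => !pvSpecial d))))
                    (cs'.dropWhile (fun d => !pvSpecial d)) := by
                rw [pvSplitAux.eq_def]; simp [hw, hq1, hq2, hq3]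
              rw [hL, hR, ih cs' hlen' 1 (c :: cur) acc (Or.inr rfl) (by simp)]
              simp only [reduceIte]
              rw [pvSplitAux_run ((c :: cur).reverse) cs']
              rcases hm with rfl | rfl
              · simp [hc0 rfl]
              · simp

theorem pvSplitB_eq (s : List Char) : pvSplitB s = pvSplit s := by
  unfold pvSplitB pvSplit
  rw [pvScanB_main s.length s (le_refl _) 0 [] [] (Or.inl rfl) (fun _ => rfl)]
  rw [if_neg (by simp)]
  cases pvSplitAux none s <;> simp

-- ---- 2. the two shlex.join ports agree ----

theorem pvFoldrQuote (l init : List Char) :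
    l.foldr (fun c r => if c = '\'' then '\'' :: '"' :: '\'' :: '"' :: '\'' :: r else c :: r) init
      = l.flatMap (fun c => if c = '\'' then ['\'', '"', '\'', '"', '\''] else [c]) ++ init := by
  induction l with
  | nil => simp
  | cons c cs ih => by_cases hc : c = '\'' <;> simp [hc, ih]

theorem pvQuoteB_eq (t : List Char) : pvQuoteB t = pvQuote t := by
  cases t with
  | nil => simp [pvQuoteB, pvQuote]
  | cons c cs =>
    rw [pvQuoteB, pvQuote]
    rw [List.all_eq_not_any_not (l := c :: cs) (p := pvSafe)]
    cases hA : (c :: cs).any (fun x => !pvSafe x) <;>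
      (simp [pvFoldrQuote]; try (split <;> simp))

theorem pvJoinB_eq (ts : List (List Char)) : pvJoinB ts = pvJoin ts := by
  match ts with
  | [] => simp [pvJoinB, pvJoin, List.intercalate]
  | [t] => simp [pvJoinB, pvJoin, List.intercalate, pvQuoteB_eq]
  | t :: t' :: tl =>
    have ih := pvJoinB_eq (t' :: tl)
    have hcc : List.intercalate [' '] (List.map pvQuote (t :: t' :: tl)) =
        pvQuote t ++ [' '] ++ List.intercalate [' '] (List.map pvQuote (t' :: tl)) := by
      simp [List.intercalate, List.intersperse]
    have hstep : pvJoinB (t :: t' :: tl) = pvQuoteB t ++ ' ' :: pvJoinB (t' :: tl) := by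
      rw [pvJoinB] <;> simp
    rw [hstep, ih, pvQuoteB_eq]
    unfold pvJoin
    rw [hcc]
    simp

-- ---- 3. the setdefault table is the first match in the normalized list ----

theorem pvDictGet (l : List (List Char × List Char)) (k : List Char) :
    (PySem.Dict.mk l).get? k =
      (l.find? (fun p : List Char × List Char => p.1 == k)).map Prod.snd := by
  induction l with
  | nil => rfl
  | cons p tl ih =>
    obtain ⟨a, b⟩ := p
    rw [PySem.Dict.get?_mk_cons]
    by_cases h : (a == k) = true
    · simp [List.find?_cons, h]
    · simp [List.find?_cons, h, ih]

theorem pvRstrip_eq (s : List Char) :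
    List.rdropWhile (fun c => c = '/') s = pvRstripSlash s := rfl

theorem pvTableB_get?_aux (reps : List (String × String))
    (d : PySem.Dict (List Char) (List Char)) (k : List Char) :
    (reps.foldl
        (fun d p =>
          if p.1.toList = [] || p.2.toList = [] then d
          else PySem.Dict.setdefault d (p.1.toList.rdropWhile (fun c => c = '/'))
            (p.2.toList.rdropWhile (fun c => c = '/'))) d).get? k =
      (d.get? k).or (((pvNormalize reps).find?
        (fun p : List Char × List Char => p.1 == k)).map Prod.snd) := by
  induction reps generalizing d with
  | nil => simp [pvNormalize]
  | cons p rest ih =>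
    rw [List.foldl_cons]
    by_cases hskip : (p.1.toList = [] || p.2.toList = []) = true
    · rw [if_pos hskip, ih]
      have hnorm : pvNormalize (p :: rest) = pvNormalize rest := by
        unfold pvNormalize
        rw [List.filterMap_cons]
        simp only [hskip, reduceIte]
      rw [hnorm]
    · rw [if_neg hskip, ih]
      rw [pvRstrip_eq, pvRstrip_eq]
      have hnorm : pvNormalize (p :: rest) =
          (pvRstripSlash p.1.toList, pvRstripSlash p.2.toList) :: pvNormalize rest := by
        unfold pvNormalize
        rw [List.filterMap_cons]
        simp only [hskip, reduceIte]
        simp at hskip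
        simp [hskip.1, hskip.2]
      rw [hnorm, List.find?_cons]
      unfold PySem.Dict.setdefault
      by_cases hcont : d.contains (pvRstripSlash p.1.toList) = true
      · rw [if_pos hcont]
        rw [PySem.Dict.contains_eq_isSome_get?] at hcont
        by_cases hk : ((pvRstripSlash p.1.toList : List Char) == k) = true
        · have hkk : pvRstripSlash p.1.toList = k := by simpa using hk
          rw [hkk] at hcont
          cases hget : d.get? k with
          | none => rw [hget] at hcont; simp at hcont
          | some v => simp [hk]
        · simp only [hk, Bool.false_eq_true, reduceIte]
      · rw [if_neg hcont]
        have hd : d = PySem.Dict.mk d.items := rfl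
        have hGA : (PySem.Dict.mk (d.items ++ [(pvRstripSlash p.1.toList,
              pvRstripSlash p.2.toList)]) : PySem.Dict (List Char) (List Char)).get? k =
            (d.get? k).or ((if (pvRstripSlash p.1.toList : List Char) == k then
              some (pvRstripSlash p.1.toList, pvRstripSlash p.2.toList) else none).map
                Prod.snd) := by
          rw [pvDictGet, List.find?_append]
          conv_rhs => rw [hd]
          rw [pvDictGet]
          cases List.find? (fun p : List Char × List Char => p.1 == k) d.items with
          | none =>
            simp only [Option.none_or, Option.map_none, Option.none_or]
            rw [List.find?_cons]
            by_cases hk : ((pvRstripSlash p.1.toList : List Char) == k) = true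
            · simp [hk]
            · simp [hk]
          | some q => simp
        rw [hGA]
        rw [PySem.Dict.contains_eq_isSome_get?] at hcont
        by_cases hk : ((pvRstripSlash p.1.toList : List Char) == k) = true
        · cases hget : d.get? k with
          | none => simp [hk]
          | some v =>
            exfalso
            have hkk : pvRstripSlash p.1.toList = k := by simpa using hk
            rw [hkk, hget] at hcont
            simp at hcont
        · simp only [hk, Bool.false_eq_true, reduceIte]
          simp [Option.or_assoc]

theorem pvTableB_get? (reps : List (String × String)) (k : List Char) :
    (pvTableB reps).get? k = ((pvNormalize reps).find?
      (fun p : List Char × List Char => p.1 == k)).map Prod.snd := by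
  unfold pvTableB
  rw [pvTableB_get?_aux]
  simp

-- ---- 4. matching = cutting the token at '/' boundaries ----

def pvMatch (token : List Char) (p : List Char × List Char) : Bool :=
  token == p.1 || PySem.Chars.startswith token (p.1 ++ ['/'])

def pvApply (token : List Char) (p : List Char × List Char) : List Char :=
  if token = p.1 then p.2 else p.2 ++ token.drop p.1.length

def pvBestStep (token : List Char) (best : Option (List Char × List Char))
    (p : List Char × List Char) : Option (List Char × List Char) :=
  if (token == p.1 || PySem.Chars.startswith token (p.1 ++ ['/'])) &&
      (match best with | none => true | some m => decide (m.1.length < p.1.length)) then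
    some p
  else best

theorem pvMatch_take (t : List Char) (p : List Char × List Char) (h : pvMatch t p = true) :
    t.take p.1.length = p.1 ∧
      (p.1.length = t.length ∨ (p.1.length < t.length ∧ t.getD p.1.length ' ' = '/')) := by
  unfold pvMatch at h
  rcases Bool.or_eq_true_iff.mp h with h1 | h2
  · have ht : t = p.1 := by simpa using h1
    subst ht
    exact ⟨List.take_length, Or.inl rfl⟩
  · obtain ⟨u, hu⟩ := (PySem.Chars.startswith_iff t (p.1 ++ ['/'])).mp h2
    subst hu
    constructor
    · rw [List.append_assoc]
      exact List.take_left
    · right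
      constructor
      · simp
      · rw [List.append_assoc]
        rw [List.getD_eq_getElem _ _ (by simp)]
        rw [List.getElem_append_right (le_refl _)]
        simp

theorem pvMatch_of_cut (t : List Char) (p : List Char × List Char) (i : Nat)
    (hcut : i = t.length ∨ (i < t.length ∧ t.getD i ' ' = '/'))
    (hp : p.1 = t.take i) : pvMatch t p = true := by
  unfold pvMatch
  rcases hcut with rfl | ⟨hlt, hget⟩
  · rw [hp, List.take_length]
    simp
  · apply Bool.or_eq_true_iff.mpr
    right
    apply (PySem.Chars.startswith_iff t (p.1 ++ ['/'])).mpr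
    have hget' : t[i] = '/' := by
      rw [List.getD_eq_getElem _ _ hlt] at hget
      exact hget
    have : p.1 ++ ['/'] = t.take (i + 1) := by
      rw [hp, List.take_succ]
      congr
      rw [List.getElem?_eq_getElem hlt, hget']
      rfl
    rw [this]
    exact List.take_prefix _ _

theorem mem_pvCutsB (t : List Char) (i : Nat) :
    i ∈ pvCutsB t ↔ i = t.length ∨ (i < t.length ∧ t.getD i ' ' = '/') := by
  simp [pvCutsB, List.mem_filter, List.mem_range]
  try tauto

theorem pvCutsB_sorted (t : List Char) : (pvCutsB t).Pairwise (· > ·) := by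
  unfold pvCutsB
  refine List.Pairwise.cons ?_ ?_
  · intro j hj
    have := (List.mem_filter.mp hj).1
    rw [List.mem_reverse, List.mem_range] at this
    omega
  · refine List.Pairwise.filter _ ?_
    rw [List.pairwise_reverse]
    exact List.pairwise_lt_range

-- ---- 5. A's sorted-scan = best (longest, earliest) match ----

def pvApplyFirstSpec (token : List Char) (l : List (List Char × List Char)) : List Char :=
  match l.find? (pvMatch token) with
  | none => token
  | some p => pvApply token p

theorem pvApplyFirst_eq_find (token : List Char) (l : List (List Char × List Char)) :
    pvApplyFirst token l = pvApplyFirstSpec token l := by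
  unfold pvApplyFirstSpec
  induction l with
  | nil => simp [pvApplyFirst]
  | cons p rest ih =>
    obtain ⟨o, n⟩ := p
    by_cases h1 : token = o
    · simp [pvApplyFirst, h1, pvMatch, pvApply, List.find?_cons]
    · by_cases h2 : PySem.Chars.startswith token (o ++ ['/']) = true
      · simp [pvApplyFirst, h1, h2, pvMatch, pvApply, List.find?_cons]
      · have hm : pvMatch token (o, n) = false := by
          simp [pvMatch, h1, h2]
        simp [pvApplyFirst, h1, h2, List.find?_cons, hm, ih]

theorem find?_insertBy {α κ : Type} [LinearOrder κ] (key : α → κ) (p : α → Bool)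
    (x : α) (s : List α) (hs : s.Pairwise (fun a b => key b ≤ key a)) :
    (PySem.List.insertBy (fun a b => decide (key b < key a)) x s).find? p =
      match s.find? p with
      | none => if p x then some x else none
      | some m => if p x && decide (key m < key x) then some x else some m := by
  induction s with
  | nil =>
    simp only [PySem.List.insertBy, List.find?]
    cases hp : p x <;> simp [hp]
  | cons y ys ih =>
    have hy : ∀ b ∈ ys, key b ≤ key y := (List.pairwise_cons.mp hs).1
    have hys : ys.Pairwise (fun a b => key b ≤ key a) := (List.pairwise_cons.mp hs).2
    by_cases hxy : key y < key x
    · simp only [PySem.List.insertBy, decide_eq_true_eq, if_pos hxy]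
      cases hm : List.find? p (y :: ys) with
      | none =>
        cases hp : p x <;> simp [List.find?_cons, hp, hm]
      | some m =>
        have hmem : m ∈ y :: ys := List.mem_of_find?_eq_some hm
        have hkm : key m ≤ key y := by
          rcases List.mem_cons.mp hmem with h | h
          · exact le_of_eq (by rw [h])
          · exact hy m h
        have : key m < key x := lt_of_le_of_lt hkm hxy
        cases hp : p x <;> simp [List.find?_cons, hp, hm, this]
    · simp only [PySem.List.insertBy, decide_eq_true_eq, if_neg hxy]
      have hxle : key x ≤ key y := le_of_not_gt hxy
      cases hpy : p y with
      | true =>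
        have : ¬ key y < key x := not_lt_of_ge hxle
        simp [List.find?_cons, hpy, this]
      | false =>
        simp [List.find?_cons, hpy, ih hys]

theorem find_sorted_eq_fold (token : List Char) (l : List (List Char × List Char)) :
    (PySem.List.sorted l (fun p => p.1.length) true).find? (pvMatch token) =
      l.foldl (pvBestStep token) none := by
  induction l using List.reverseRecOn with
  | nil => simp [PySem.List.sorted_rev_eq_foldl_insertBy]
  | append_singleton l x ih =>
    have hrw : PySem.List.sorted (l ++ [x]) (fun p => p.1.length) true =
        PySem.List.insertBy
          (fun a b => decide ((fun p : List Char × List Char => p.1.length) b <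
            (fun p : List Char × List Char => p.1.length) a)) x
          (PySem.List.sorted l (fun p => p.1.length) true) := by
      rw [PySem.List.sorted_rev_eq_foldl_insertBy, PySem.List.sorted_rev_eq_foldl_insertBy,
        List.foldl_append]
      simp
    rw [hrw, List.foldl_append,
      find?_insertBy (fun p : List Char × List Char => p.1.length) (pvMatch token) x _
        (PySem.List.sorted_pairwise_rev l (fun p => p.1.length)), ih]
    cases hb : List.foldl (pvBestStep token) none l with
    | none =>
      simp only [List.foldl_cons, List.foldl_nil, pvBestStep]
      cases hp : pvMatch token x <;> simp [pvMatch] at hp <;> simp [hp]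
    | some m =>
      simp only [List.foldl_cons, List.foldl_nil, pvBestStep]
      cases hp : pvMatch token x
      · simp [pvMatch] at hp
        simp [hp.1, hp.2]
      · simp [pvMatch] at hp
        rcases hp with hp | hp
        · by_cases hlt : m.1.length < x.1.length <;> simp [hp, hlt]
        · by_cases hlt : m.1.length < x.1.length <;> simp [hp, hlt]

theorem fold_props (t : List Char) (norm : List (List Char × List Char)) :
    match norm.foldl (pvBestStep t) none with
    | none => ∀ p ∈ norm, pvMatch t p = false
    | some m => pvMatch t m = true ∧ norm.find? (fun p => p.1 == m.1) = some m ∧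
        ∀ p ∈ norm, pvMatch t p = true → p.1.length ≤ m.1.length := by
  induction norm using List.reverseRecOn with
  | nil => simp
  | append_singleton l q ih =>
    have hBS : ∀ b, pvBestStep t b q =
        if pvMatch t q &&
            (match b with | none => true | some m => decide (m.1.length < q.1.length)) then
          some q
        else b := fun b => rfl
    rw [List.foldl_append, List.foldl_cons, List.foldl_nil]
    have hcongr : ∀ p q : List Char × List Char, p.1 = q.1 → pvMatch t p = pvMatch t q := by
      intro p q h
      unfold pvMatch
      rw [h]
    cases hb : List.foldl (pvBestStep t) none l with
    | none =>
      rw [hb] at ih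
      dsimp only at ih
      rw [hBS]
      cases hq : pvMatch t q with
      | false =>
        simp only [Bool.false_and, Bool.false_eq_true, reduceIte]
        intro p hp
        rcases List.mem_append.mp hp with hp | hp
        · exact ih p hp
        · rw [List.mem_singleton.mp hp]
          exact hq
      | true =>
        simp only [Bool.true_and]
        refine ⟨hq, ?_, ?_⟩
        · rw [List.find?_append]
          have hflnone : l.find? (fun p : List Char × List Char => p.1 == q.1) = none := by
            rw [List.find?_eq_none]
            intro p hp hpq
            have hpq' : p.1 = q.1 := by simpa using hpq
            have h2 := ih p hp
            rw [hcongr p q hpq', hq] at h2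
            simp at h2
          rw [hflnone]
          simp [List.find?_cons]
        · intro p hp hpm
          rcases List.mem_append.mp hp with hp | hp
          · exact absurd hpm (by simp [ih p hp])
          · rw [List.mem_singleton.mp hp]
    | some m =>
      rw [hb] at ih
      dsimp only at ih
      obtain ⟨hmt, hfind, hmax⟩ := ih
      rw [hBS]
      cases hq : pvMatch t q with
      | false =>
        simp only [Bool.false_and, Bool.false_eq_true, reduceIte]
        refine ⟨hmt, ?_, ?_⟩
        · rw [List.find?_append, hfind]
          rfl
        · intro p hp hpm
          rcases List.mem_append.mp hp with hp | hp
          · exact hmax p hp hpm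
          · rw [List.mem_singleton.mp hp] at hpm
            exact absurd hpm (by simp [hq])
      | true =>
        simp only [Bool.true_and]
        by_cases hlt : m.1.length < q.1.length
        · rw [if_pos (by simpa using hlt)]
          refine ⟨hq, ?_, ?_⟩
          · rw [List.find?_append]
            have hflnone : l.find? (fun p : List Char × List Char => p.1 == q.1) = none := by
              rw [List.find?_eq_none]
              intro p hp hpq
              have hpq' : p.1 = q.1 := by simpa using hpq
              have hle := hmax p hp (by rw [hcongr p q hpq']; exact hq)
              have hlen : p.1.length = q.1.length := by rw [hpq']
              omega
            rw [hflnone]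
            simp [List.find?_cons]
          · intro p hp hpm
            rcases List.mem_append.mp hp with hp | hp
            · exact le_trans (hmax p hp hpm) (le_of_lt hlt)
            · rw [List.mem_singleton.mp hp]
        · rw [if_neg (by simpa using hlt)]
          refine ⟨hmt, ?_, ?_⟩
          · rw [List.find?_append, hfind]
            rfl
          · intro p hp hpm
            rcases List.mem_append.mp hp with hp | hp
            · exact hmax p hp hpm
            · rw [List.mem_singleton.mp hp]
              omega

-- ---- 6. per-token agreement, and the verdict ----

theorem findSome?_desc {β : Type} (f : Nat → Option β) (v : β) (i₀ : Nat) (l : List Nat)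
    (hp : l.Pairwise (· > ·)) (hm : i₀ ∈ l) (hnone : ∀ j ∈ l, i₀ < j → f j = none)
    (hi : f i₀ = some v) : l.findSome? f = some v := by
  induction l with
  | nil => simp at hm
  | cons h tl ih =>
    rcases List.mem_cons.mp hm with rfl | hm'
    · simp [List.findSome?_cons, hi]
    · have hgt : h > i₀ := (List.pairwise_cons.mp hp).1 _ hm'
      have hn : f h = none := hnone h List.mem_cons_self hgt
      rw [List.findSome?_cons, hn]
      exact ih (List.pairwise_cons.mp hp).2 hm'
        (fun j hj hij => hnone j (List.mem_cons_of_mem _ hj) hij)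

theorem rewriteTok_eq (t : List Char) (reps : List (String × String)) :
    pvApplyFirst t (PySem.List.sorted (pvNormalize reps) (fun p => p.1.length) true) =
      pvRewriteTokB t (pvTableB reps) := by
  rw [pvApplyFirst_eq_find]
  unfold pvApplyFirstSpec pvRewriteTokB
  rw [find_sorted_eq_fold]
  have hprops := fold_props t (pvNormalize reps)
  cases hb : List.foldl (pvBestStep t) none (pvNormalize reps) with
  | none =>
    rw [hb] at hprops
    dsimp only at hprops
    have hnone : (pvCutsB t).findSome?
        (fun i => ((pvTableB reps).get? (t.take i)).map (fun n => n ++ t.drop i)) = none := by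
      apply List.findSome?_eq_none_iff.mpr
      intro i hi
      rw [pvTableB_get?]
      cases hf : (pvNormalize reps).find? (fun p : List Char × List Char => p.1 == t.take i) with
      | none => rfl
      | some p =>
        exfalso
        have hmem := List.mem_of_find?_eq_some hf
        have hp1 : p.1 = t.take i := by simpa using List.find?_some hf
        have hcut := (mem_pvCutsB t i).mp hi
        have := pvMatch_of_cut t p i hcut hp1
        rw [hprops p hmem] at this
        simp at this
    rw [hnone]
  | some m =>
    rw [hb] at hprops
    dsimp only at hprops
    obtain ⟨hmt, hfind, hmax⟩ := hprops
    obtain ⟨htk, hcut0⟩ := pvMatch_take t m hmt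
    have hi0mem : m.1.length ∈ pvCutsB t := (mem_pvCutsB t m.1.length).mpr hcut0
    have hf0 : ((pvTableB reps).get? (t.take m.1.length)).map (fun n => n ++ t.drop m.1.length)
        = some (m.2 ++ t.drop m.1.length) := by
      rw [pvTableB_get?, htk, hfind]
      rfl
    have hnone : ∀ j ∈ pvCutsB t, m.1.length < j →
        ((pvTableB reps).get? (t.take j)).map (fun n => n ++ t.drop j) = none := by
      intro j hj hlt
      rw [pvTableB_get?]
      cases hf : (pvNormalize reps).find? (fun p : List Char × List Char => p.1 == t.take j) with
      | none => rfl
      | some p =>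
        exfalso
        have hmem := List.mem_of_find?_eq_some hf
        have hp1 : p.1 = t.take j := by simpa using List.find?_some hf
        have hcut := (mem_pvCutsB t j).mp hj
        have hjle : j ≤ t.length := by
          rcases hcut with h | h
          · omega
          · omega
        have hmatch := pvMatch_of_cut t p j hcut hp1
        have hle := hmax p hmem hmatch
        have hplen : p.1.length = j := by
          rw [hp1, List.length_take]
          omega
        omega
    rw [findSome?_desc _ _ m.1.length _ (pvCutsB_sorted t) hi0mem hnone hf0]
    dsimp only
    unfold pvApply
    by_cases hE : t = m.1
    · rw [if_pos hE]
      have : m.1.length = t.length := by rw [hE]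
      rw [this, List.drop_length]
      simp
    · rw [if_neg hE]

-- ===== VERDICT (by name: the statement is the Claim_ definition above) =====
theorem rewrite_command_paths_spec : Claim_equal_rewrite_command_paths := by
  intro command replacements _
  unfold Spec_rewrite_command_paths rewrite_command_paths rewrite_command_paths_alt
  by_cases h0 : command.toList = []
  · simp [h0]
  · rw [pvSplitB_eq]
    simp only [if_neg h0]
    cases hs : pvSplit command.toList with
    | none => rfl
    | some tokens =>
      simp only []
      congr 1
      rw [PySem.List.foldl_append_singleton_eq_map, List.nil_append, pvJoinB_eq]
      unfold pvJoin
      congr 1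
      simp only [List.map_map]
      apply List.map_congr_left
      intro t _
      simp only [Function.comp_apply]
      rw [rewriteTok_eq]
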